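-- pv_equiv track=rewrite | github.com/RiccardoRonz/ant | ant.py | _check_if_bounday_is_touched
-- ===== SOURCE A (Python) =====
-- def _check_if_bounday_is_touched(points, n) -> bool:
--     """For generating our list of admissible points (the points that live inside the boundary) we adopt a naive approach, considering a given n*n square and evaluating which of the points satisfy the boundary. This function is used to determined wether the square used is big enough: if at least one of our admissible points touches the edges of our boundary, we need to increase the n*n square.
--
--     Args:
--         points (list): list of tuples containing the admissible points
--         n (int): size of the side of the square
--
--     Returns:
--         bool: Returns True if any point touches the boundary. False otherwise.
--     """
--     if points is None:
--         return True
--     coordinates = [item for t in points for item in t]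
--     max_el = max(coordinates)
--     min_el = min(coordinates)
--     if (abs(max_el) >= n) or (abs(min_el) >= n):
--         return True
--     return False
-- ===== SOURCE B (Python) =====
-- def _check_if_bounday_is_touched(points, n) -> bool:
--     if points is None:
--         return True
--     for row in points:
--         if _row_touches(row, n):
--             return True
--     return False
--
--
-- def _row_touches(row, n):
--     for c in row:
--         if not (-n < c < n):
--             return True
--     return False
-- ===== Notes on version B (the rewrite author's own statement) =====
-- stated objective: alternative
-- what changed: Replaces A's flatten-then-max-and-min-then-abs-compare pipeline with a short-circuit row-by-row membership test: a per-row helper returns at the first coordinate outside the open interval (-n, n); no intermediate list, no max/min, no abs.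
-- outside the precondition, e.g. on _check_if_bounday_is_touched([()], 5): A raises ValueError, B returns False
import Mathlib
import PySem

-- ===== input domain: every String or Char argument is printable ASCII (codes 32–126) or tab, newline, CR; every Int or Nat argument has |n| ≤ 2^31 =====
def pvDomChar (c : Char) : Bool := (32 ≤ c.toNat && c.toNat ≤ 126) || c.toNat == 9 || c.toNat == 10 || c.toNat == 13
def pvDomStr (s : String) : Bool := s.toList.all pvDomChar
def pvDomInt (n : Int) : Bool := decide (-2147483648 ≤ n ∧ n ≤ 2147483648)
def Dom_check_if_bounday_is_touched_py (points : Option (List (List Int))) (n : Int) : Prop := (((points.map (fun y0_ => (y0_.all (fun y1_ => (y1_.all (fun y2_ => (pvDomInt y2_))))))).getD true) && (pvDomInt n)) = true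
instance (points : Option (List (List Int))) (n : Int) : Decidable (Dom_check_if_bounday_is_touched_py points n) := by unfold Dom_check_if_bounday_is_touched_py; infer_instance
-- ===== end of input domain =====

-- B replaces A's flatten + max + min + abs-compare pipeline by short-circuit
-- structural recursion over rows and coordinates (objective: alternative);
-- where A raises ValueError (no coordinates, excluded by Pre_) B returns False.

-- ===== PORT A =====
def check_if_bounday_is_touched_py (points : Option (List (List Int))) (n : Int) : Bool :=
  match points with
  | none => true
  | some points =>
    let coordinates := points.flatMap (fun t => t)
    match PySem.List.max? coordinates (fun x => x), PySem.List.min? coordinates (fun x => x) with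
    | some max_el, some min_el => if (|max_el| ≥ n) || (|min_el| ≥ n) then true else false
    | _, _ => true   -- unreachable under Pre_ (Python raises ValueError on empty coordinates)

-- ===== PORT B =====
def pvRowTouches (row : List Int) (n : Int) : Bool :=
  match row with
  | [] => false
  | c :: rest => (!(decide (-n < c ∧ c < n))) || pvRowTouches rest n

def pvRowsTouch (rows : List (List Int)) (n : Int) : Bool :=
  match rows with
  | [] => false
  | r :: rest => pvRowTouches r n || pvRowsTouch rest n

def check_if_bounday_is_touched_py_alt (points : Option (List (List Int))) (n : Int) : Bool :=
  match points with
  | none => true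
  | some points => pvRowsTouch points n

-- ===== PRECONDITION & SPEC =====
-- Pre_ excludes exactly the inputs where A raises ValueError (max of an empty list):
-- points = some ps whose flattened coordinate list is empty.
def Pre_check_if_bounday_is_touched_py (points : Option (List (List Int))) (n : Int) : Prop :=
  points = none ∨ (points.getD []).flatMap (fun t => t) ≠ []
instance (points : Option (List (List Int))) (n : Int) : Decidable (Pre_check_if_bounday_is_touched_py points n) := by unfold Pre_check_if_bounday_is_touched_py; infer_instance
def pvWitness_check_if_bounday_is_touched_py : Option (List (List Int)) × Int := (some [[1, 2]], 3)

def Spec_check_if_bounday_is_touched_py (points : Option (List (List Int))) (n : Int) (out : Bool) : Prop := out = check_if_bounday_is_touched_py_alt points n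
instance (points : Option (List (List Int))) (n : Int) (out : Bool) : Decidable (Spec_check_if_bounday_is_touched_py points n out) := by unfold Spec_check_if_bounday_is_touched_py; infer_instance

-- ===== CLAIM (what is proved, stated in full; the proofs are below) =====
def Claim_equal_check_if_bounday_is_touched_py : Prop := ∀ (points : Option (List (List Int))) (n : Int), Dom_check_if_bounday_is_touched_py points n → Pre_check_if_bounday_is_touched_py points n → Spec_check_if_bounday_is_touched_py points n (check_if_bounday_is_touched_py points n)

-- ===== LEMMAS AND PROOFS =====

-- B's recursive row check is the 'any' of "coordinate outside (-n, n)" over the row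
theorem pvRowTouches_any (row : List Int) (n : Int) :
    pvRowTouches row n = row.any (fun c => !(decide (-n < c ∧ c < n))) := by
  induction row with
  | nil => rfl
  | cons c rest ih => simp [pvRowTouches, ih]

-- B's recursive rows check is the 'any' over the flattened coordinates
theorem pvRowsTouch_any (rows : List (List Int)) (n : Int) :
    pvRowsTouch rows n = (rows.flatMap (fun t => t)).any (fun c => !(decide (-n < c ∧ c < n))) := by
  induction rows with
  | nil => rfl
  | cons r rest ih => simp [pvRowsTouch, pvRowTouches_any, ih, List.any_append]

-- n ≤ a running max iff n ≤ the seed or some element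
theorem pv_foldl_max_ge (t : List Int) : ∀ (x n : Int),
    (n ≤ t.foldl max x) ↔ (n ≤ x ∨ ∃ c ∈ t, n ≤ c) := by
  induction t with
  | nil => intro x n; simp
  | cons y t ih =>
    intro x n
    simp only [List.foldl, ih (max x y) n, List.mem_cons]
    constructor
    · rintro (h | ⟨c, hc, hn⟩)
      · rcases le_max_iff.mp h with h | h
        · exact Or.inl h
        · exact Or.inr ⟨y, Or.inl rfl, h⟩
      · exact Or.inr ⟨c, Or.inr hc, hn⟩
    · rintro (h | ⟨c, rfl | hc, hn⟩)
      · exact Or.inl (le_max_of_le_left h)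
      · exact Or.inl (le_max_of_le_right hn)
      · exact Or.inr ⟨c, hc, hn⟩

-- a running min is ≤ some bound iff the seed or some element is
theorem pv_foldl_min_le (t : List Int) : ∀ (x n : Int),
    (t.foldl min x ≤ n) ↔ (x ≤ n ∨ ∃ c ∈ t, c ≤ n) := by
  induction t with
  | nil => intro x n; simp
  | cons y t ih =>
    intro x n
    simp only [List.foldl, ih (min x y) n, List.mem_cons]
    constructor
    · rintro (h | ⟨c, hc, hn⟩)
      · rcases min_le_iff.mp h with h | h
        · exact Or.inl h
        · exact Or.inr ⟨y, Or.inl rfl, h⟩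
      · exact Or.inr ⟨c, Or.inr hc, hn⟩
    · rintro (h | ⟨c, rfl | hc, hn⟩)
      · exact Or.inl (le_trans (min_le_left _ _) h)
      · exact Or.inl (le_trans (min_le_right _ _) hn)
      · exact Or.inr ⟨c, hc, hn⟩

-- the seed is below the running max and above the running min
theorem pv_le_foldl_max (t : List Int) : ∀ (x : Int), x ≤ t.foldl max x := by
  induction t with
  | nil => intro x; exact le_refl x
  | cons y t ih => intro x; exact le_trans (le_max_left x y) (ih (max x y))

theorem pv_foldl_min_le_self (t : List Int) : ∀ (x : Int), t.foldl min x ≤ x := by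
  induction t with
  | nil => intro x; exact le_refl x
  | cons y t ih => intro x; exact le_trans (ih (min x y)) (min_le_left x y)

-- ===== VERDICT (by name: the statement is the Claim_ definition above) =====
theorem check_if_bounday_is_touched_py_spec : Claim_equal_check_if_bounday_is_touched_py := by
  intro points n _ hpre
  unfold Spec_check_if_bounday_is_touched_py
  cases points with
  | none => rfl
  | some ps =>
    rcases hpre with h | h
    · exact absurd h (by simp)
    simp only [Option.getD] at h
    simp only [check_if_bounday_is_touched_py, check_if_bounday_is_touched_py_alt]
    rw [pvRowsTouch_any]
    cases hcs : ps.flatMap (fun t => t) with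
    | nil => exact absurd hcs h
    | cons x t =>
      simp only [hcs, PySem.List.max?_id_cons, PySem.List.min?_id_cons]
      have hmax := pv_foldl_max_ge t x n
      have hmin := pv_foldl_min_le t x (-n)
      have hxM : x ≤ t.foldl max x := pv_le_foldl_max t x
      have hmx : t.foldl min x ≤ x := pv_foldl_min_le_self t x
      have key : (n ≤ |t.foldl max x| ∨ n ≤ |t.foldl min x|) ↔
          ((x :: t).any (fun c => !(decide (-n < c ∧ c < n))) = true) := by
        rw [List.any_eq_true]
        constructor
        · rintro (hMa | hma)
          · rcases le_abs.mp hMa with h1 | h1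
            · rcases hmax.mp h1 with h2 | ⟨c, hc, h2⟩
              · exact ⟨x, List.mem_cons_self, by simp; omega⟩
              · exact ⟨c, List.mem_cons_of_mem _ hc, by simp; omega⟩
            · exact ⟨x, List.mem_cons_self, by simp; omega⟩
          · rcases le_abs.mp hma with h1 | h1
            · exact ⟨x, List.mem_cons_self, by simp; omega⟩
            · rcases hmin.mp (by omega) with h2 | ⟨c, hc, h2⟩
              · exact ⟨x, List.mem_cons_self, by simp; omega⟩
              · exact ⟨c, List.mem_cons_of_mem _ hc, by simp; omega⟩
        · rintro ⟨c, hc, hcp⟩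
          have hcc : c ≤ -n ∨ n ≤ c := by simp at hcp; omega
          rcases hcc with hcle | hcge
          · right
            have hmle : t.foldl min x ≤ -n := by
              rcases List.mem_cons.mp hc with rfl | hct
              · omega
              · exact hmin.mpr (Or.inr ⟨c, hct, hcle⟩)
            exact le_abs.mpr (Or.inr (by omega))
          · left
            have hMge : n ≤ t.foldl max x := by
              rcases List.mem_cons.mp hc with rfl | hct
              · omega
              · exact hmax.mpr (Or.inr ⟨c, hct, hcge⟩)
            exact le_abs.mpr (Or.inl hMge)
      by_cases hA : (n ≤ |t.foldl max x| ∨ n ≤ |t.foldl min x|)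
      · rw [key.mp hA]
        rcases hA with h | h <;> simp [h]
      · have hB : ((x :: t).any (fun c => !(decide (-n < c ∧ c < n)))) = false := by
          cases hany : ((x :: t).any (fun c => !(decide (-n < c ∧ c < n)))) with
          | true => exact absurd (key.mpr hany) hA
          | false => rfl
        push_neg at hA
        rw [hB, if_neg]
        simp only [Bool.or_eq_true, decide_eq_true_eq, not_or, not_le, ge_iff_le]
        exact hA
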